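-- pv_equiv track=rewrite | github.com/36base/girlsfrontline-resources-extract | abunpack.py | eq_path
-- ===== SOURCE A (Python) =====
-- def eq_path(value1: str, value2: str) -> bool:
--     """경로 두가지를 받아서 비교. 반드시 / 만 사용.
--     패턴 사이에 빈공간이 있으면 모든 값이 있어도 되는것으로 판단
--
--     Args:
--         value1(str): 비교대상
--         value2(str): 패턴(즉 value1이 value2에 맞는지 순차적으로 실험)
--
--     Return:
--         ret(bool): 참/거짓
--     """
--     # ori: 비교대상
--     # con: 패턴
--     ori = value1.split("/")
--     con = value2.split("/")
--     if len(ori) != len(con):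
--         return False
--     for n, i in enumerate(con):
--         if i == "":
--             continue
--         elif i != ori[n]:
--             return False
--         else:
--             continue
--     else:
--         return True
-- ===== SOURCE B (Python) =====
-- def eq_path(value1: str, value2: str) -> bool:
--     """Recursive structural walk of both segment lists in lockstep:
--     no length pre-check and no indexed loop."""
--     def go(ori, con):
--         if not ori and not con:
--             return True
--         if not ori or not con:
--             return False
--         return (con[0] == "" or con[0] == ori[0]) and go(ori[1:], con[1:])
--     return go(value1.split("/"), value2.split("/"))
-- ===== Notes on version B (the rewrite author's own statement) =====
-- stated objective: alternative
-- what changed: Replaces A's length pre-check plus indexed enumerate-loop with early returns by a single structural recursion that walks both segment lists in lockstep (length mismatch falls out of the recursion, no ori[n] indexing).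
import Mathlib
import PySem

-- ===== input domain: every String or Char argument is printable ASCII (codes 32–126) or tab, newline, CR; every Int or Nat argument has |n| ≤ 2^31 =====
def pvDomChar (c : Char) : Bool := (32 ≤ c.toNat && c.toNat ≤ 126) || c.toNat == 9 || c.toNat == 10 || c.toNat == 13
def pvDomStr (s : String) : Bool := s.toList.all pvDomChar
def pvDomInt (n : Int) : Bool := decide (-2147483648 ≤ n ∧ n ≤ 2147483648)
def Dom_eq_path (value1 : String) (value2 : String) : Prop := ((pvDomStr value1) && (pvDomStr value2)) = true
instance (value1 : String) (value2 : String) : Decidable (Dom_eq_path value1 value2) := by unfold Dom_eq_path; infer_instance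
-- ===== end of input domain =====

-- B replaces A's length pre-check + indexed enumerate-loop by one lockstep structural
-- recursion over both segment lists (objective: alternative decomposition, same cost).

-- ===== PORT A =====
-- A's for-loop over enumerate(con) with early return False; ori[n] is in range whenever
-- the loop runs (the length guard has passed), so the getD default is never used.
def eqPathLoop (ori : List String) : List (Int × String) → Bool
  | [] => true
  | (n, i) :: rest =>
    if i = "" then eqPathLoop ori rest
    else if i ≠ (PySem.List.pyGet? ori n).getD "" then false
    else eqPathLoop ori rest

def eq_path (value1 : String) (value2 : String) : Bool :=
  let ori := (PySem.Str.split? value1 "/").getD []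
  let con := (PySem.Str.split? value2 "/").getD []
  if ori.length ≠ con.length then false
  else eqPathLoop ori (PySem.List.enumerate con)

-- ===== PORT B =====
def eqPathGo : List String → List String → Bool
  | [], [] => true
  | o :: ro, c :: rc => (c == "" || c == o) && eqPathGo ro rc
  | _, _ => false

def eq_path_alt (value1 : String) (value2 : String) : Bool :=
  eqPathGo ((PySem.Str.split? value1 "/").getD []) ((PySem.Str.split? value2 "/").getD [])

-- ===== PRECONDITION & SPEC =====
def Spec_eq_path (value1 : String) (value2 : String) (out : Bool) : Prop := out = eq_path_alt value1 value2
instance (value1 : String) (value2 : String) (out : Bool) : Decidable (Spec_eq_path value1 value2 out) := by unfold Spec_eq_path; infer_instance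

-- ===== CLAIM (what is proved, stated in full; the proofs are below) =====
def Claim_equal_eq_path : Prop := ∀ (value1 : String) (value2 : String), Dom_eq_path value1 value2 → Spec_eq_path value1 value2 (eq_path value1 value2)

-- ===== LEMMAS AND PROOFS =====

theorem eqPathGo_len_ne (ori con : List String) (h : ori.length ≠ con.length) :
    eqPathGo ori con = false := by
  induction ori generalizing con with
  | nil => cases con with
    | nil => simp at h
    | cons c rc => rfl
  | cons o ro ih => cases con with
    | nil => rfl
    | cons c rc =>
      simp only [eqPathGo]
      rw [ih rc (by simpa using h)]
      simp

theorem eqPathLoop_eq_go (con : List String) :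
    ∀ (k : Nat) (ori : List String), ori.length = k + con.length →
    eqPathLoop ori (PySem.List.enumerate con (k : Int)) = eqPathGo (ori.drop k) con := by
  induction con with
  | nil =>
    intro k ori hlen
    simp only [List.length_nil] at hlen
    have hd : ori.drop k = [] := by
      apply List.drop_eq_nil_of_le; omega
    simp [PySem.List.enumerate_nil, eqPathLoop, hd, eqPathGo]
  | cons c rc ih =>
    intro k ori hlen
    have hk : k < ori.length := by simp at hlen; omega
    have hdrop : ori.drop k = ori[k] :: ori.drop (k + 1) :=
      List.drop_eq_getElem_cons hk
    have hget : (PySem.List.pyGet? ori (k : Int)).getD "" = ori[k] := by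
      simp [PySem.List.pyGet?_natCast, List.getElem?_eq_getElem hk]
    have hcast : ((k : Int) + 1) = ((k + 1 : Nat) : Int) := by push_cast; ring
    have ihk := ih (k + 1) ori (by simp at hlen ⊢; omega)
    simp only [PySem.List.enumerate_cons, eqPathLoop, hget, hcast, ihk, hdrop, eqPathGo]
    by_cases hc : c = ""
    · simp [hc]
    · by_cases heq : c = ori[k]
      · simp [heq]
      · simp [hc, heq]

-- ===== VERDICT (by name: the statement is the Claim_ definition above) =====
theorem eq_path_spec : Claim_equal_eq_path := by
  intro value1 value2 _
  unfold Spec_eq_path eq_path eq_path_alt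
  set ori := (PySem.Str.split? value1 "/").getD [] with hori
  set con := (PySem.Str.split? value2 "/").getD [] with hcon
  by_cases h : ori.length = con.length
  · simp only [h, ne_eq, not_true_eq_false, if_false]
    have := eqPathLoop_eq_go con 0 ori (by simpa using h)
    simpa using this
  · simp only [ne_eq, h, not_false_eq_true, if_true]
    exact (eqPathGo_len_ne ori con h).symm
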